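-- pv_equiv track=rewrite | github.com/Kurumin/exercise_load_balancer | load_balance.py | distribute_users
-- ===== SOURCE A (Python) =====
-- def distribute_users(new_users_, servers_, umax_, ttask_):
--     """ Distribute all new users to servers """
--     for server in servers_:
--         if len(server) < umax_:
--             if new_users_ >= umax_-len(server):
--                 for i in range(umax_-len(server)):
--                     server.append(ttask_)
--                     new_users_ -= 1
--
--             else:
--                 for i in range(new_users_):
--                     server.append(ttask_)
--                     new_users_ -= 1
--
--     if new_users_ >= 1:
--         servers_.append([])
--         distribute_users(new_users_, servers_, umax_, ttask_)
--
--     return servers_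
-- ===== SOURCE B (Python) =====
-- def distribute_users(new_users_, servers_, umax_, ttask_):
--     """ Distribute all new users to servers """
--     remaining = new_users_
--     for server in servers_:
--         if remaining <= 0:
--             break
--         gap = umax_ - len(server)
--         if gap > 0:
--             k = gap if remaining >= gap else remaining
--             server.extend([ttask_] * k)
--             remaining -= k
--     if remaining >= 1:
--         full, part = divmod(remaining, umax_)
--         for _ in range(full):
--             servers_.append([ttask_] * umax_)
--         if part:
--             servers_.append([ttask_] * part)
--     return servers_
-- ===== Notes on version B (the rewrite author's own statement) =====
-- stated objective: alternative
-- what changed: Replaces A's tail recursion (which re-scans the whole server list once per newly appended server and appends users one at a time) by a single fill pass over the existing servers followed by a divmod closed form that appends all new full/partial server blocks at once; Pre_ excludes the inputs where A raises RecursionError (umax_ <= 0 with new_users_ >= 1, and users needing many appended servers, bounded conservatively at 900 so a few deep-but-returning inputs are also excluded, on which B returns the identical value).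
import Mathlib
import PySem

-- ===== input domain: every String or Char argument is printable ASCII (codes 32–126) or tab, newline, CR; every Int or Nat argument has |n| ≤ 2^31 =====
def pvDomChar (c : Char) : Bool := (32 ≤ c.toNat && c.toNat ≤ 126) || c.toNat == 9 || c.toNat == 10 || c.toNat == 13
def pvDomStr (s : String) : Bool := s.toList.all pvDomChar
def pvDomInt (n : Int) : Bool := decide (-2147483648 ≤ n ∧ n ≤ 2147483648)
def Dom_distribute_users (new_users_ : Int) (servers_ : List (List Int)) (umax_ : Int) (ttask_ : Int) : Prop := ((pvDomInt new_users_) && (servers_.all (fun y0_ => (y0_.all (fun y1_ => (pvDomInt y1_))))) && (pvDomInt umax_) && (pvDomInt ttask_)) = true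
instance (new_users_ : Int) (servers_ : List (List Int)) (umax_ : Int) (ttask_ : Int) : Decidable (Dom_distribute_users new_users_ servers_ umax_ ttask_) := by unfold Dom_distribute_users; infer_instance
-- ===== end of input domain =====

-- B replaces A's recursion (one rescan pass per appended server, one append per user) by one
-- fill pass plus a divmod closed form for the appended servers (an alternative algorithm).
-- Both A and B mutate servers_ in place; the equivalence proved here is about the return value.


-- ===== PORT A =====
-- 'for i in range(count): server.append(ttask_); new_users_ -= 1' — state (server, new_users_)
def pvAppendLoop (ttask : Int) (st : List Int × Int) (count : Int) : List Int × Int :=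
  (PySem.List.pyRange 0 count 1).foldl (fun st _ => (st.1 ++ [ttask], st.2 - 1)) st

-- 'for server in servers_: …' — returns the mutated servers and the final new_users_
def pvPassA (umax ttask : Int) : List (List Int) → Int → List (List Int) × Int
  | [], nu => ([], nu)
  | s :: ss, nu =>
    let p :=
      if (s.length : Int) < umax then
        (if nu ≥ umax - (s.length : Int) then pvAppendLoop ttask (s, nu) (umax - (s.length : Int))
         else pvAppendLoop ttask (s, nu) nu)
      else (s, nu)
    let q := pvPassA umax ttask ss p.2
    (p.1 :: q.1, q.2)

-- A's tail recursion, with fuel making it total; fuel never runs out under Pre_ (umax_ ≥ 1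
-- makes every recursive call strictly decrease new_users_).
def pvDuA (umax ttask : Int) : Nat → Int → List (List Int) → List (List Int)
  | 0, _, servers => servers
  | fuel+1, nu, servers =>
    let p := pvPassA umax ttask servers nu
    if p.2 ≥ 1 then pvDuA umax ttask fuel p.2 (p.1 ++ [[]]) else p.1

def distribute_users (new_users_ : Int) (servers_ : List (List Int)) (umax_ : Int) (ttask_ : Int) : List (List Int) :=
  pvDuA umax_ ttask_ (new_users_.toNat + 1) new_users_ servers_

-- ===== PORT B =====
-- B's single pass: fill each existing server, with the early 'break' once remaining ≤ 0
def pvFillB (umax ttask : Int) : List (List Int) → Int → List (List Int) × Int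
  | [], r => ([], r)
  | s :: ss, r =>
    if r ≤ 0 then (s :: ss, r)
    else
      let gap := umax - (s.length : Int)
      if gap > 0 then
        let k := if r ≥ gap then gap else r
        let q := pvFillB umax ttask ss (r - k)
        ((s ++ List.replicate k.toNat ttask) :: q.1, q.2)
      else
        let q := pvFillB umax ttask ss r
        (s :: q.1, q.2)

def distribute_users_alt (new_users_ : Int) (servers_ : List (List Int)) (umax_ : Int) (ttask_ : Int) : List (List Int) :=
  let p := pvFillB umax_ ttask_ servers_ new_users_
  if p.2 ≥ 1 then
    -- full, part = divmod(remaining, umax_); append full copies of [ttask_]*umax_, then [ttask_]*part if part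
    let full := PySem.Int.floordiv p.2 umax_
    let part := PySem.Int.mod p.2 umax_
    p.1 ++ List.replicate full.toNat (List.replicate umax_.toNat ttask_)
        ++ (if part ≠ 0 then [List.replicate part.toNat ttask_] else [])
  else p.1

-- ===== PRECONDITION & SPEC =====
-- free capacity of the existing servers
def pvFreeCap (servers_ : List (List Int)) (umax_ : Int) : Int :=
  (servers_.map (fun s => max (umax_ - (s.length : Int)) 0)).sum
-- Pre_ excludes the inputs on which A raises RecursionError: umax_ ≤ 0 with new_users_ ≥ 1
-- (A recurses forever appending empty servers it can never fill), and users beyond the free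
-- capacity plus 900 full servers (one recursive call per appended server overflows CPython's
-- stack); the latter bound is conservative, so it also excludes some deep-but-returning
-- inputs, on which B returns the identical value.
def Pre_distribute_users (new_users_ : Int) (servers_ : List (List Int)) (umax_ : Int) (ttask_ : Int) : Prop :=
  (1 ≤ umax_ ∧ new_users_ ≤ pvFreeCap servers_ umax_ + 900 * umax_) ∨ new_users_ ≤ 0
instance (new_users_ : Int) (servers_ : List (List Int)) (umax_ : Int) (ttask_ : Int) : Decidable (Pre_distribute_users new_users_ servers_ umax_ ttask_) := by unfold Pre_distribute_users; infer_instance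
def pvWitness_distribute_users : Int × List (List Int) × Int × Int := (5, [[1], [2, 2]], 2, 7)

def Spec_distribute_users (new_users_ : Int) (servers_ : List (List Int)) (umax_ : Int) (ttask_ : Int) (out : List (List Int)) : Prop := out = distribute_users_alt new_users_ servers_ umax_ ttask_
instance (new_users_ : Int) (servers_ : List (List Int)) (umax_ : Int) (ttask_ : Int) (out : List (List Int)) : Decidable (Spec_distribute_users new_users_ servers_ umax_ ttask_ out) := by unfold Spec_distribute_users; infer_instance

-- ===== CLAIM (what is proved, stated in full; the proofs are below) =====
def Claim_equal_distribute_users : Prop := ∀ (new_users_ : Int) (servers_ : List (List Int)) (umax_ : Int) (ttask_ : Int), Dom_distribute_users new_users_ servers_ umax_ ttask_ → Pre_distribute_users new_users_ servers_ umax_ ttask_ → Spec_distribute_users new_users_ servers_ umax_ ttask_ (distribute_users new_users_ servers_ umax_ ttask_)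

-- ===== LEMMAS AND PROOFS =====

-- the closed form of B's trailing block of appended servers
def pvBlocks (umax ttask r : Int) : List (List Int) :=
  List.replicate (PySem.Int.floordiv r umax).toNat (List.replicate umax.toNat ttask)
    ++ (if PySem.Int.mod r umax ≠ 0 then [List.replicate (PySem.Int.mod r umax).toNat ttask] else [])

theorem pvAppendLoop_foldl (t : Int) (l : List Int) (s : List Int) (nu : Int) :
    l.foldl (fun (st : List Int × Int) _ => (st.1 ++ [t], st.2 - 1)) (s, nu)
      = (s ++ List.replicate l.length t, nu - l.length) := by
  induction l generalizing s nu with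
  | nil => simp
  | cons a l ih =>
      simp only [List.foldl_cons, ih, List.length_cons, List.append_assoc,
        List.singleton_append, List.replicate_succ]
      congr 1
      push_cast; ring

theorem pvAppendLoop_eq (t c : Int) (s : List Int) (nu : Int) :
    pvAppendLoop t (s, nu) c = (s ++ List.replicate c.toNat t, nu - c.toNat) := by
  unfold pvAppendLoop
  rw [pvAppendLoop_foldl]
  have h : (PySem.List.pyRange 0 c 1).length = c.toNat := by
    simp
  rw [h]

theorem pvPassA_id (umax t : Int) : ∀ (ss : List (List Int)) (m : Int), m ≤ 0 →
    pvPassA umax t ss m = (ss, m) := by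
  intro ss
  induction ss with
  | nil => intro m _; rfl
  | cons a as iha =>
      intro m hm
      simp only [pvPassA]
      by_cases hlt : (a.length : Int) < umax
      · have hge : ¬ m ≥ umax - (a.length : Int) := by omega
        have hm0 : m.toNat = 0 := by omega
        simp [hlt, hge, pvAppendLoop_eq, hm0, iha m hm]
      · simp [hlt, iha m hm]

theorem pvPassA_eq_fillB (umax t : Int) (ss : List (List Int)) (nu : Int) :
    pvPassA umax t ss nu = pvFillB umax t ss nu := by
  induction ss generalizing nu with
  | nil => rfl
  | cons s ss ih =>
      by_cases hnu : nu ≤ 0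
      · -- break: A's pass changes nothing once new_users_ ≤ 0
        rw [pvPassA_id umax t (s :: ss) nu hnu]
        simp [pvFillB, hnu]
      · simp only [pvPassA, pvFillB]
        rw [if_neg hnu]
        by_cases hgap : umax - (s.length : Int) > 0
        · rw [if_pos hgap]
          have hlt : (s.length : Int) < umax := by omega
          by_cases hge : nu ≥ umax - (s.length : Int)
          · have harg : nu - ((umax.toNat - s.length : Nat) : Int) = nu - (umax - (s.length : Int)) := by
              omega
            simp [hlt, hge, pvAppendLoop_eq, harg, ih]
          · have hk : ((nu.toNat : Nat) : Int) = nu := by omega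
            simp [hlt, hge, pvAppendLoop_eq, hk, ih]
        · have hlt : ¬ (s.length : Int) < umax := by omega
          simp [hlt, ih]

-- B's fill never increases the remainder
theorem pvFillB_snd_le (umax t : Int) (ss : List (List Int)) (r : Int) :
    (pvFillB umax t ss r).2 ≤ r := by
  induction ss generalizing r with
  | nil => simp [pvFillB]
  | cons s ss ih =>
      simp only [pvFillB]
      split_ifs with h0 hgap hge <;> dsimp only
      · exact le_refl r
      · exact le_trans (ih _) (by omega)
      · exact le_trans (ih _) (by omega)
      · exact ih r

-- if users remain after the fill pass, every server in its output is full
theorem pvFillB_saturated (umax t : Int) (ss : List (List Int)) (r : Int)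
    (h : 1 ≤ (pvFillB umax t ss r).2) :
    ∀ s ∈ (pvFillB umax t ss r).1, umax ≤ (s.length : Int) := by
  induction ss generalizing r with
  | nil => simp [pvFillB] at h ⊢
  | cons s ss ih =>
      simp only [pvFillB] at h ⊢
      split_ifs at h ⊢ with h0 hgap hge <;> dsimp only at h ⊢
      · exact absurd h (by omega)
      · intro x hx
        rcases List.mem_cons.1 hx with rfl | hx
        · simp; omega
        · exact ih _ h x hx
      · exact absurd h (by have := pvFillB_snd_le umax t ss (r - r); omega)
      · intro x hx
        rcases List.mem_cons.1 hx with rfl | hx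
        · omega
        · exact ih _ h x hx

-- A's pass leaves full servers untouched
theorem pvPassA_append_saturated (umax t : Int) (xs ys : List (List Int)) (nu : Int)
    (h : ∀ s ∈ xs, umax ≤ (s.length : Int)) :
    pvPassA umax t (xs ++ ys) nu = (xs ++ (pvPassA umax t ys nu).1, (pvPassA umax t ys nu).2) := by
  induction xs with
  | nil => simp
  | cons x xs ih =>
      have hx : ¬ (x.length : Int) < umax := by
        have := h x (by simp); omega
      simp only [List.cons_append, pvPassA, hx, if_false]
      rw [ih (fun s hs => h s (by simp [hs]))]

-- A's recursion, on a saturated prefix, builds exactly B's divmod closed form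
theorem pvDuA_blocks (umax t : Int) (hu : 1 ≤ umax) :
    ∀ (fuel : Nat) (r : Int) (filled : List (List Int)),
      1 ≤ r → r.toNat ≤ fuel → (∀ s ∈ filled, umax ≤ (s.length : Int)) →
      pvDuA umax t fuel r (filled ++ [[]]) = filled ++ pvBlocks umax t r := by
  intro fuel
  induction fuel with
  | zero => intro r filled hr hf _; omega
  | succ fuel ih =>
      intro r filled hr hf hsat
      have hpass := pvPassA_append_saturated umax t filled [[]] r hsat
      by_cases hge : r ≥ umax
      · -- the new server is filled to umax_, remainder r - umax_
        have hk : ((umax.toNat : Nat) : Int) = umax := by omega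
        have hone : pvPassA umax t [[]] r = ([List.replicate umax.toNat t], r - umax) := by
          simp only [pvPassA, List.length_nil, Int.natCast_zero, sub_zero]
          rw [if_pos (by omega : (0 : Int) < umax), if_pos (by omega : r ≥ umax),
            pvAppendLoop_eq]
          simp only [List.nil_append, hk]
        have hdiv : PySem.Int.floordiv r umax = PySem.Int.floordiv (r - umax) umax + 1 := by
          rw [PySem.Int.floordiv_eq_ediv_of_pos (by omega), PySem.Int.floordiv_eq_ediv_of_pos (by omega)]
          have hsplit := Int.add_mul_ediv_right (r - umax) 1 (by omega : umax ≠ 0)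
          simp at hsplit
          omega
        have hmod : PySem.Int.mod r umax = PySem.Int.mod (r - umax) umax := by
          rw [PySem.Int.mod_eq_emod_of_pos (by omega), PySem.Int.mod_eq_emod_of_pos (by omega),
            Int.sub_emod_right]
        by_cases hr1 : r - umax ≥ 1
        · -- recurse
          simp only [pvDuA, hpass, hone]
          rw [if_pos hr1]
          have hsat' : ∀ s ∈ filled ++ [List.replicate umax.toNat t], umax ≤ (s.length : Int) := by
            intro s hs
            rcases List.mem_append.1 hs with hs | hs
            · exact hsat s hs
            · rcases List.mem_singleton.1 hs with rfl
              simp only [List.length_replicate]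
              omega
          have hstep := ih (r - umax) (filled ++ [List.replicate umax.toNat t]) hr1 (by omega) hsat'
          rw [hstep, List.append_assoc]
          congr 1
          unfold pvBlocks
          rw [hdiv, hmod]
          have htn : (PySem.Int.floordiv (r - umax) umax + 1).toNat
              = (PySem.Int.floordiv (r - umax) umax).toNat + 1 := by
            have : 0 ≤ PySem.Int.floordiv (r - umax) umax := by
              rw [PySem.Int.floordiv_eq_ediv_of_pos (by omega)]
              exact Int.ediv_nonneg (by omega) (by omega)
            omega
          rw [htn, List.replicate_succ]
          simp
        · -- r = umax exactly: last appended server finishes the job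
          have hru : r = umax := by omega
          simp only [pvDuA, hpass, hone]
          rw [if_neg hr1]
          have hdd : PySem.Int.floordiv r umax = 1 := by
            rw [PySem.Int.floordiv_eq_ediv_of_pos (by omega), hru, Int.ediv_self (by omega)]
          have hmm : PySem.Int.mod r umax = 0 := by
            rw [PySem.Int.mod_eq_emod_of_pos (by omega), hru]; simp
          unfold pvBlocks
          rw [hdd, hmm]
          simp
      · -- 1 ≤ r < umax: partial last server, recursion stops
        have hk : ((r.toNat : Nat) : Int) = r := by omega
        have hone : pvPassA umax t [[]] r = ([List.replicate r.toNat t], 0) := by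
          simp only [pvPassA, List.length_nil, Int.natCast_zero, sub_zero]
          rw [if_pos (by omega : (0 : Int) < umax), if_neg (by omega : ¬ r ≥ umax),
            pvAppendLoop_eq]
          simp only [List.nil_append, hk, sub_self]
        simp only [pvDuA, hpass, hone]
        rw [if_neg (by omega : ¬ (0 : Int) ≥ 1)]
        have hdd : PySem.Int.floordiv r umax = 0 := by
          rw [PySem.Int.floordiv_eq_ediv_of_pos (by omega)]
          exact Int.ediv_eq_zero_of_lt (by omega) (by omega)
        have hmm : PySem.Int.mod r umax = r := by
          rw [PySem.Int.mod_eq_emod_of_pos (by omega)]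
          exact Int.emod_eq_of_lt (by omega) (by omega)
        unfold pvBlocks
        rw [hdd, hmm]
        simp [if_neg (by omega : ¬ r = 0)]

-- ===== VERDICT (by name: the statement is the Claim_ definition above) =====
theorem distribute_users_spec : Claim_equal_distribute_users := by
  intro nu sv umax t _ hpre
  unfold Spec_distribute_users distribute_users distribute_users_alt
  simp only [pvDuA, pvPassA_eq_fillB]
  set p := pvFillB umax t sv nu with hp
  by_cases h1 : p.2 ≥ 1
  · rw [if_pos h1, if_pos h1]
    have hle : p.2 ≤ nu := pvFillB_snd_le umax t sv nu
    have hu : 1 ≤ umax := by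
      rcases hpre with ⟨hu, _⟩ | hnu
      · exact hu
      · omega
    have hfuel : p.2.toNat ≤ nu.toNat := by omega
    have hsat := pvFillB_saturated umax t sv nu h1
    have := pvDuA_blocks umax t hu nu.toNat p.2 p.1 h1 hfuel hsat
    rw [this]
    unfold pvBlocks
    simp
  · rw [if_neg h1, if_neg h1]
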